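-- pv_equiv track=rewrite | github.com/dahuilangda/Boltz-WebUI | run_single_prediction.py | _strip_problem_loops_text
-- ===== SOURCE A (Python) =====
-- from typing import Optional, List, Tuple, Dict, Any, Iterable
--
-- def _strip_problem_loops_text(cif_text: str, prefixes: Tuple[str, ...]) -> str:
--     lines = cif_text.splitlines()
--     out_lines: List[str] = []
--     i = 0
--     while i < len(lines):
--         line = lines[i]
--         stripped = line.strip()
--         if stripped.lower() == "loop_":
--             tag_lines = []
--             j = i + 1
--             while j < len(lines) and lines[j].strip().startswith("_"):
--                 tag_lines.append(lines[j].strip())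
--                 j += 1
--             if tag_lines and any(
--                 any(tag.lower().startswith(prefix.lower()) for tag in tag_lines)
--                 for prefix in prefixes
--             ):
--                 # Skip loop data rows until next item/loop/data block
--                 k = j
--                 while k < len(lines):
--                     row_stripped = lines[k].strip()
--                     if not row_stripped:
--                         k += 1
--                         continue
--                     if row_stripped.startswith("_") or row_stripped.lower() == "loop_" or row_stripped.lower().startswith("data_"):
--                         break
--                     k += 1
--                 i = k
--                 continue
--             out_lines.append(line)
--             i += 1
--             continue
--         out_lines.append(line)
--         i += 1
--     return "\n".join(out_lines) + ("\n" if out_lines else "")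
-- ===== SOURCE B (Python) =====
-- def _strip_problem_loops_text(cif_text, prefixes):
--     pref = [p.lower() for p in prefixes]
--     lines = cif_text.splitlines()
--     out = []
--     buf = []
--     tags = []
--     mode = "normal"
--
--     def matches():
--         return bool(tags) and any(
--             any(t.lower().startswith(p) for t in tags) for p in pref
--         )
--
--     idx = 0
--     while idx < len(lines):
--         line = lines[idx]
--         s = line.strip()
--         if mode == "normal":
--             if s.lower() == "loop_":
--                 mode = "collect"
--                 buf = [line]
--                 tags = []
--             else:
--                 out.append(line)
--             idx += 1
--         elif mode == "collect":
--             if s.startswith("_"):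
--                 buf.append(line)
--                 tags.append(s)
--                 idx += 1
--             elif matches():
--                 mode = "skip"            # reprocess current line in skip mode
--             else:
--                 out.extend(buf)
--                 mode = "normal"          # reprocess current line in normal mode
--         else:  # skip
--             if not s:
--                 idx += 1
--             elif s.startswith("_") or s.lower() == "loop_" or s.lower().startswith("data_"):
--                 mode = "normal"          # reprocess terminating line
--             else:
--                 idx += 1
--     if mode == "collect" and not matches():
--         out.extend(buf)
--     return "\n".join(out) + ("\n" if out else "")
-- ===== Notes on version B (the rewrite author's own statement) =====
-- stated objective: alternative
-- what changed: Replaced A's index-based outer while loop with nested inner while-loop rescans (tag collection and row skipping via j/k cursors) by a single forward pass driven by an explicit mode variable (normal / collecting tags / skipping rows) with a small line buffer, lowercasing the prefixes once up front.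
import Mathlib
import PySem

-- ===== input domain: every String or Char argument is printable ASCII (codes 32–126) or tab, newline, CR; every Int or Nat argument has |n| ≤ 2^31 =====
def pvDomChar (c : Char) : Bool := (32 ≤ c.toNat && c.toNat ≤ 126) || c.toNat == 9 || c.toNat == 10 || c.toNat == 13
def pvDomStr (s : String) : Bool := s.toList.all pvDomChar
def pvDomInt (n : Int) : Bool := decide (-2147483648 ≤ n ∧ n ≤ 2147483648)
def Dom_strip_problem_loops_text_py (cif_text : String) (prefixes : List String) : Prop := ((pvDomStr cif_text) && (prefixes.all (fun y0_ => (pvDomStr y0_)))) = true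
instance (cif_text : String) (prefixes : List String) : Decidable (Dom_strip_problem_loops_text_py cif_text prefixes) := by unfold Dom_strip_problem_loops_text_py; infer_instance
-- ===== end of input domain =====

-- B rewrites A's index-based scan with nested rescanning while-loops as a single
-- forward pass with an explicit mode (normal / collecting tags / skipping rows) and a
-- small buffer; objective: alternative decomposition, same exact output.

-- ===== PORT A =====
-- termination helpers, cited by name in the ports' decreasing_by
theorem pvDecStep (n j : Nat) (h : j < n) : n - (j + 1) < n - j := Nat.sub_succ_lt_self n j h

-- inner while loop collecting stripped tag lines (returns (tag_lines, j))
def pvACollect (lines : List String) (j : Nat) (acc : List String) : List String × Nat :=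
  if h : j < lines.length then
    if PySem.Str.startswith (PySem.Str.strip lines[j]) "_" then
      pvACollect lines (j + 1) (acc ++ [PySem.Str.strip lines[j]])
    else (acc, j)
  else (acc, j)
termination_by lines.length - j
decreasing_by exact pvDecStep lines.length j h

-- inner while loop skipping loop data rows (returns k)
def pvASkip (lines : List String) (k : Nat) : Nat :=
  if h : k < lines.length then
    if PySem.Str.strip lines[k] == "" then pvASkip lines (k + 1)
    else if PySem.Str.startswith (PySem.Str.strip lines[k]) "_" || PySem.Str.lower (PySem.Str.strip lines[k]) == "loop_" || PySem.Str.startswith (PySem.Str.lower (PySem.Str.strip lines[k])) "data_" then k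
    else pvASkip lines (k + 1)
  else k
termination_by lines.length - k
decreasing_by all_goals exact pvDecStep lines.length k h

theorem pvACollect_snd_ge (lines : List String) (j : Nat) (acc : List String) :
    j ≤ (pvACollect lines j acc).2 := by
  unfold pvACollect
  split
  · split
    · exact Nat.le_trans (Nat.le_succ j) (pvACollect_snd_ge lines (j + 1) _)
    · simp
  · simp
termination_by lines.length - j

theorem pvASkip_ge (lines : List String) (k : Nat) : k ≤ pvASkip lines k := by
  unfold pvASkip
  split
  · split
    · exact Nat.le_trans (Nat.le_succ k) (pvASkip_ge lines (k + 1))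
    · split
      · exact Nat.le_refl k
      · exact Nat.le_trans (Nat.le_succ k) (pvASkip_ge lines (k + 1))
  · exact Nat.le_refl k
termination_by lines.length - k

theorem pvAMainDec (lines : List String) (i : Nat) (h : i < lines.length) :
    lines.length - pvASkip lines (pvACollect lines (i + 1) []).2 < lines.length - i := by
  have h1 := pvACollect_snd_ge lines (i + 1) []
  have h2 := pvASkip_ge lines (pvACollect lines (i + 1) []).2
  omega

-- outer while loop of A
def pvAMain (prefixes : List String) (lines : List String) (i : Nat) (out_lines : List String) : List String :=
  if h : i < lines.length then
    if PySem.Str.lower (PySem.Str.strip lines[i]) == "loop_" then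
      if !(pvACollect lines (i + 1) []).1.isEmpty && prefixes.any (fun prefix_ => (pvACollect lines (i + 1) []).1.any (fun tag => PySem.Str.startswith (PySem.Str.lower tag) (PySem.Str.lower prefix_))) then
        pvAMain prefixes lines (pvASkip lines (pvACollect lines (i + 1) []).2) out_lines
      else
        pvAMain prefixes lines (i + 1) (out_lines ++ [lines[i]])
    else
      pvAMain prefixes lines (i + 1) (out_lines ++ [lines[i]])
  else out_lines
termination_by lines.length - i
decreasing_by
  · exact pvAMainDec lines i h
  · exact pvDecStep lines.length i h
  · exact pvDecStep lines.length i h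

def strip_problem_loops_text_py (cif_text : String) (prefixes : List String) : String :=
  PySem.Str.join "\n" (pvAMain prefixes (PySem.Str.splitlines cif_text) 0 []) ++
    (if !(pvAMain prefixes (PySem.Str.splitlines cif_text) 0 []).isEmpty then "\n" else "")

-- ===== PORT B =====
inductive PvMode where
  | normal : PvMode
  | collect : List String → List String → PvMode   -- buffered original lines, buffered stripped tags
  | skip : PvMode

def pvModeRank : PvMode → Nat
  | .collect _ _ => 2
  | .skip => 1
  | .normal => 0

theorem pvBDecStep (l : String) (rest : List String) (a b : Nat) (h : a < b + 3) :
    3 * rest.length + a < 3 * (l :: rest).length + b := by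
  simp only [List.length_cons]; omega

theorem pvBDecMode (n a b : Nat) (h : a < b) : 3 * n + a < 3 * n + b :=
  Nat.add_lt_add_left h _

-- single forward pass; a line is reprocessed (kept in the list) when the mode changes
def pvBGo (pref : List String) (lines : List String) (mode : PvMode) (out : List String) : List String :=
  match lines, mode with
  | [], .normal => out
  | [], .skip => out
  | [], .collect buf tags =>
      if !tags.isEmpty && pref.any (fun p => tags.any (fun t => PySem.Str.startswith (PySem.Str.lower t) p)) then out
      else out ++ buf
  | l :: rest, .normal =>
      if PySem.Str.lower (PySem.Str.strip l) == "loop_" then pvBGo pref rest (.collect [l] []) out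
      else pvBGo pref rest .normal (out ++ [l])
  | l :: rest, .collect buf tags =>
      if PySem.Str.startswith (PySem.Str.strip l) "_" then pvBGo pref rest (.collect (buf ++ [l]) (tags ++ [PySem.Str.strip l])) out
      else if !tags.isEmpty && pref.any (fun p => tags.any (fun t => PySem.Str.startswith (PySem.Str.lower t) p)) then
        pvBGo pref (l :: rest) .skip out
      else
        pvBGo pref (l :: rest) .normal (out ++ buf)
  | l :: rest, .skip =>
      if PySem.Str.strip l == "" then pvBGo pref rest .skip out
      else if PySem.Str.startswith (PySem.Str.strip l) "_" || PySem.Str.lower (PySem.Str.strip l) == "loop_" || PySem.Str.startswith (PySem.Str.lower (PySem.Str.strip l)) "data_" then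
        pvBGo pref (l :: rest) .normal out
      else pvBGo pref rest .skip out
termination_by 3 * lines.length + pvModeRank mode
decreasing_by
  · exact pvBDecStep l rest 2 0 (Nat.lt_of_sub_eq_succ rfl)
  · exact pvBDecStep l rest 0 0 (Nat.lt_of_sub_eq_succ rfl)
  · exact pvBDecStep l rest 2 2 (Nat.lt_of_sub_eq_succ rfl)
  · exact pvBDecMode (l :: rest).length 1 2 (Nat.lt_of_sub_eq_succ rfl)
  · exact pvBDecMode (l :: rest).length 0 2 (Nat.lt_of_sub_eq_succ rfl)
  · exact pvBDecStep l rest 1 1 (Nat.lt_of_sub_eq_succ rfl)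
  · exact pvBDecMode (l :: rest).length 0 1 (Nat.lt_of_sub_eq_succ rfl)
  · exact pvBDecStep l rest 1 1 (Nat.lt_of_sub_eq_succ rfl)

def strip_problem_loops_text_py_alt (cif_text : String) (prefixes : List String) : String :=
  PySem.Str.join "\n" (pvBGo (prefixes.map PySem.Str.lower) (PySem.Str.splitlines cif_text) .normal []) ++
    (if !(pvBGo (prefixes.map PySem.Str.lower) (PySem.Str.splitlines cif_text) .normal []).isEmpty then "\n" else "")

-- ===== PRECONDITION & SPEC =====
def Spec_strip_problem_loops_text_py (cif_text : String) (prefixes : List String) (out : String) : Prop := out = strip_problem_loops_text_py_alt cif_text prefixes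
instance (cif_text : String) (prefixes : List String) (out : String) : Decidable (Spec_strip_problem_loops_text_py cif_text prefixes out) := by unfold Spec_strip_problem_loops_text_py; infer_instance

-- ===== CLAIM (what is proved, stated in full; the proofs are below) =====
def Claim_equal_strip_problem_loops_text_py : Prop := ∀ (cif_text : String) (prefixes : List String), Dom_strip_problem_loops_text_py cif_text prefixes → Spec_strip_problem_loops_text_py cif_text prefixes (strip_problem_loops_text_py cif_text prefixes)

-- ===== LEMMAS AND PROOFS =====

-- the shared match condition, with A's phrasing
def pvP (prefixes : List String) (tags : List String) : Bool :=
  !tags.isEmpty && prefixes.any (fun p => tags.any (fun t => PySem.Str.startswith (PySem.Str.lower t) (PySem.Str.lower p)))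

theorem pvP_map (prefixes tags : List String) :
    (!tags.isEmpty && (prefixes.map PySem.Str.lower).any (fun p => tags.any (fun t => PySem.Str.startswith (PySem.Str.lower t) p))) = pvP prefixes tags := by
  simp [pvP, List.any_map, Function.comp_def]

-- a stripped line that starts with '_' is never the "loop_" keyword
theorem pv_tag_not_loop (s : String) (h : PySem.Str.startswith s "_" = true) :
    (PySem.Str.lower s == "loop_") = false := by
  rw [beq_eq_false_iff_ne]
  intro he
  have hl : (PySem.Str.lower s).toList = "loop_".toList := by rw [he]
  rw [PySem.Str.startswith_eq, PySem.Chars.startswith_iff] at h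
  obtain ⟨t, ht⟩ := h
  simp only [PySem.Str.toList_lower, ← ht] at hl
  simp only [PySem.Chars.lower, List.map_append] at hl
  have h1 : PySem.Chars.lowerChar '_' = 'l' := by
    have := congrArg (fun xs => xs.head?) hl
    simpa using this
  exact absurd h1 (by decide)

-- skipping: B's skip mode from position k lands where A's inner k-loop lands
theorem pv_skip_eq (pref : List String) (lines : List String) (k : Nat) (out : List String) :
    pvBGo pref (lines.drop k) .skip out = pvBGo pref (lines.drop (pvASkip lines k)) .normal out := by
  unfold pvASkip
  split
  · rename_i h
    rw [List.drop_eq_getElem_cons h]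
    rw [pvBGo]
    split
    · exact pv_skip_eq pref lines (k + 1) out
    · split
      · rw [← List.drop_eq_getElem_cons h]
      · exact pv_skip_eq pref lines (k + 1) out
  · rename_i h
    rw [List.drop_eq_nil_of_le (le_of_not_gt h)]
    simp [pvBGo]
termination_by lines.length - k

-- collecting: B's collect mode from position j
theorem pv_collect_eq (prefixes : List String) (lines : List String) (j : Nat) (buf tags out : List String) :
    pvBGo (prefixes.map PySem.Str.lower) (lines.drop j) (.collect buf tags) out =
      (if pvP prefixes (pvACollect lines j tags).1 then
        pvBGo (prefixes.map PySem.Str.lower) (lines.drop (pvACollect lines j tags).2) .skip out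
      else
        pvBGo (prefixes.map PySem.Str.lower) (lines.drop (pvACollect lines j tags).2) .normal
          (out ++ buf ++ (lines.drop j).take ((pvACollect lines j tags).2 - j))) := by
  unfold pvACollect
  split
  · rename_i h
    rw [List.drop_eq_getElem_cons h]
    rw [pvBGo]
    split
    · rename_i htag
      have hge := pvACollect_snd_ge lines (j + 1) (tags ++ [PySem.Str.strip lines[j]])
      rw [pv_collect_eq prefixes lines (j + 1) (buf ++ [lines[j]]) (tags ++ [PySem.Str.strip lines[j]]) out]
      have hj : (pvACollect lines (j + 1) (tags ++ [PySem.Str.strip lines[j]])).2 - j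
          = ((pvACollect lines (j + 1) (tags ++ [PySem.Str.strip lines[j]])).2 - (j + 1)) + 1 := by omega
      rw [hj, List.take_succ_cons]
      split
      · rfl
      · simp
    · rw [pvP_map]
      simp [← List.drop_eq_getElem_cons h]
  · rename_i h
    have hd : lines.drop j = [] := List.drop_eq_nil_of_le (le_of_not_gt h)
    rw [hd]
    simp only [pvBGo]
    rw [pvP_map]
    split
    · simp
    · simp
termination_by lines.length - j

-- B's normal mode walks plainly over the tag segment A's collect loop found
theorem pv_normal_tags (prefixes : List String) (lines : List String) (j : Nat) (acc out : List String) :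
    pvBGo (prefixes.map PySem.Str.lower) (lines.drop j) .normal out =
      pvBGo (prefixes.map PySem.Str.lower) (lines.drop (pvACollect lines j acc).2) .normal
        (out ++ (lines.drop j).take ((pvACollect lines j acc).2 - j)) := by
  unfold pvACollect
  split
  · rename_i h
    split
    · rename_i htag
      have hge := pvACollect_snd_ge lines (j + 1) (acc ++ [PySem.Str.strip lines[j]])
      rw [List.drop_eq_getElem_cons h, pvBGo, pv_tag_not_loop _ htag]
      simp only [Bool.false_eq_true, if_false]
      rw [pv_normal_tags prefixes lines (j + 1) (acc ++ [PySem.Str.strip lines[j]]) (out ++ [lines[j]])]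
      have hj : (pvACollect lines (j + 1) (acc ++ [PySem.Str.strip lines[j]])).2 - j
          = ((pvACollect lines (j + 1) (acc ++ [PySem.Str.strip lines[j]])).2 - (j + 1)) + 1 := by omega
      rw [hj, List.take_succ_cons]
      simp
    · simp
  · simp
termination_by lines.length - j

-- the main correspondence: A's outer loop from i = B from the i-th suffix in normal mode
theorem pv_main_eq (prefixes : List String) (lines : List String) (i : Nat) (out : List String) :
    pvAMain prefixes lines i out = pvBGo (prefixes.map PySem.Str.lower) (lines.drop i) .normal out := by
  unfold pvAMain
  split
  · rename_i h
    rw [List.drop_eq_getElem_cons h, pvBGo]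
    split
    · rw [pv_collect_eq prefixes lines (i + 1) [lines[i]] [] out]
      have hge := pvACollect_snd_ge lines (i + 1) []
      have hpv : (!(pvACollect lines (i + 1) []).1.isEmpty && prefixes.any (fun prefix_ => (pvACollect lines (i + 1) []).1.any (fun tag => PySem.Str.startswith (PySem.Str.lower tag) (PySem.Str.lower prefix_)))) = pvP prefixes (pvACollect lines (i + 1) []).1 := rfl
      rw [hpv]
      split
      · rw [pv_skip_eq]
        exact pv_main_eq prefixes lines (pvASkip lines (pvACollect lines (i + 1) []).2) out
      · rw [pv_main_eq prefixes lines (i + 1) (out ++ [lines[i]]),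
            pv_normal_tags prefixes lines (i + 1) [] (out ++ [lines[i]])]
    · exact pv_main_eq prefixes lines (i + 1) (out ++ [lines[i]])
  · rename_i h
    rw [List.drop_eq_nil_of_le (by omega), pvBGo]
termination_by lines.length - i
decreasing_by all_goals
  (have _h1 := pvACollect_snd_ge lines (i + 1) []
   have _h2 := pvASkip_ge lines (pvACollect lines (i + 1) []).2
   omega)

-- ===== VERDICT (by name: the statement is the Claim_ definition above) =====
theorem strip_problem_loops_text_py_spec : Claim_equal_strip_problem_loops_text_py := by
  intro cif_text prefixes _
  unfold Spec_strip_problem_loops_text_py strip_problem_loops_text_py strip_problem_loops_text_py_alt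
  have h := pv_main_eq prefixes (PySem.Str.splitlines cif_text) 0 []
  rw [List.drop_zero] at h
  rw [h]
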